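-- pv_equiv track=rewrite | github.com/zizai/notebooks | agents/max.py | get_draw_set
-- ===== SOURCE A (Python) =====
-- def get_draw_set(expressions):
--     """
--     Find a sorted set of draw type from the entire dataset. The idea is to
--     use only the plausible position, scale and shape combinations and
--     reject that are not possible because of the restrictions we have in
--     the dataset.
--     :param expressions: List containing entire dataset in the form of
--     expressions.
--     :return: unique_chunks: Unique sorted draw operations in the dataset.
--     """
--     shapes = ["u", "p", "y"]
--     chunks = []
--     for expression in expressions:
--         for i, e in enumerate(expression):
--             if e in shapes:
--                 index = i
--                 last_index = expression[index:].index(")")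
--                 chunks.append(expression[index:index + last_index + 1])
--     return list(set(chunks))
-- ===== SOURCE B (Python) =====
-- def get_draw_set(expressions):
--     chunks = []
--     for expression in expressions:
--         # one right-to-left pass: rel[i] = distance from i to the next ')' (None if there is none)
--         rel = []
--         r = None
--         for ch in reversed(expression):
--             r = 0 if ch == ')' else (None if r is None else r + 1)
--             rel.append(r)
--         rel.reverse()
--         for i, ch in enumerate(expression):
--             if ch in "upy":
--                 if rel[i] is None:
--                     raise ValueError("unclosed draw operation")
--                 chunks.append(expression[i:i + rel[i] + 1])
--     return list(dict.fromkeys(chunks))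
-- ===== Notes on version B (the rewrite author's own statement) =====
-- stated objective: alternative
-- what changed: B replaces A's per-marker forward scan of the suffix for ')' (with a fresh suffix slice per marker) by a single right-to-left pass per expression that precomputes the distance to the next ')' for every position, then slices each chunk directly and dedups via dict.fromkeys instead of set.
import Mathlib
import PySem

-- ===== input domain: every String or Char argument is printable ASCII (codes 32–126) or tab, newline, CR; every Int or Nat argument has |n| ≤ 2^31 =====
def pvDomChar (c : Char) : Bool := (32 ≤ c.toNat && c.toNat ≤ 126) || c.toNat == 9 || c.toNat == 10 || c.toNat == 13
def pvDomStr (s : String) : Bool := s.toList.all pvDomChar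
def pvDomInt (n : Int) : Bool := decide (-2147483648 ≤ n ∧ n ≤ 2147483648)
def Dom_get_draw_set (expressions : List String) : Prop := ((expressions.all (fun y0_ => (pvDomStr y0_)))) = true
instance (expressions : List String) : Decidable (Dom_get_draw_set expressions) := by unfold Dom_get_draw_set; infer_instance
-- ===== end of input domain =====

-- B replaces A's per-marker forward scan for ')' by one right-to-left distance-to-next-')' pass
-- per expression and dedups in first-occurrence order (A's list(set(..)) order is unspecified;
-- the result is compared as a set).


-- ===== PORT A =====
def pvShapes : List Char := ['u', 'p', 'y']

-- body of A's inner loop ('expression[index:].index(")")' is a single-char search, so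
-- PySem.List.index? on the sliced suffix is exact; 'none' is Python's ValueError, excluded by Pre_)
def pvStepA (l0 : List Char) (chunks : List String) (ie : Int × Char) : List String :=
  if ie.2 ∈ pvShapes then
    match PySem.List.index? (PySem.List.slice l0 (some ie.1) none) ')' with
    | some last_index =>
        chunks ++ [String.ofList (PySem.List.slice l0 (some ie.1) (some (ie.1 + (last_index : Int) + 1)))]
    | none => chunks          -- Python raises ValueError here; excluded by Pre_
  else chunks

-- A returns list(set(chunks)); set iteration order is unspecified in Python, the output is
-- compared as a set, so the port returns the distinct chunks in first-occurrence order.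
def get_draw_set (expressions : List String) : List String :=
  PySem.Set.ofList
    (expressions.foldl
      (fun chunks expression =>
        (PySem.List.enumerate expression.toList 0).foldl (pvStepA expression.toList) chunks)
      [])

-- ===== PORT B =====
-- the right-to-left pass: first component is the running r, second the rel list built so far
def pvRelStep (c : Char) (p : Option Nat × List (Option Nat)) : Option Nat × List (Option Nat) :=
  let r := if c = ')' then some 0 else p.1.map (· + 1)
  (r, r :: p.2)

def pvRel (l : List Char) : List (Option Nat) := (l.foldr pvRelStep (none, [])).2

-- the forward loop: walk the characters together with their rel values; the current suffix is
-- in hand, so expression[i:i+rel[i]+1] is take (rel+1) of it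
def pvCollect : List Char → List (Option Nat) → List String
  | c :: rest, r :: rrest =>
      (if c ∈ pvShapes then
         match r with
         | some k => [String.ofList ((c :: rest).take (k + 1))]
         | none => []
       else []) ++ pvCollect rest rrest
  | _, _ => []

def get_draw_set_alt (expressions : List String) : List String :=
  PySem.List.dedup
    (expressions.foldl
      (fun chunks expression => chunks ++ pvCollect expression.toList (pvRel expression.toList))
      [])

-- ===== PRECONDITION & SPEC =====
-- Pre_ excludes exactly the inputs where Python A raises ValueError: some expression has a
-- shape character with no ')' at or after its position.
def Pre_get_draw_set (expressions : List String) : Prop :=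
  ∀ s ∈ expressions, ∀ i ∈ List.range s.toList.length,
    s.toList.getD i ' ' ∈ pvShapes → ')' ∈ s.toList.drop i
instance (expressions : List String) : Decidable (Pre_get_draw_set expressions) := by
  unfold Pre_get_draw_set; infer_instance

def pvWitness_get_draw_set : List String := ["up) a", "y x)"]

def Spec_get_draw_set (expressions : List String) (out : List String) : Prop := out = get_draw_set_alt expressions
instance (expressions : List String) (out : List String) : Decidable (Spec_get_draw_set expressions out) := by unfold Spec_get_draw_set; infer_instance

-- ===== CLAIM (what is proved, stated in full; the proofs are below) =====
def Claim_equal_get_draw_set : Prop := ∀ (expressions : List String), Dom_get_draw_set expressions → Pre_get_draw_set expressions → Spec_get_draw_set expressions (get_draw_set expressions)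

-- ===== LEMMAS AND PROOFS =====

-- the running value of B's right-to-left pass is the index of the first ')'
lemma pvRel_fst (l : List Char) :
    (l.foldr pvRelStep (none, [])).1 = PySem.List.index? l ')' := by
  induction l with
  | nil => simp [PySem.List.index?_eq_idxOf?, List.idxOf?]
  | cons c rest ih =>
    rw [List.foldr_cons]
    by_cases hc : c = ')'
    · subst hc; rw [PySem.List.index?_cons_self]; simp [pvRelStep]
    · rw [PySem.List.index?_cons_of_ne rest hc]; simp [pvRelStep, hc, ih]

lemma pvRel_cons (c : Char) (rest : List Char) :
    pvRel (c :: rest) = PySem.List.index? (c :: rest) ')' :: pvRel rest := by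
  unfold pvRel
  rw [List.foldr_cons]
  by_cases hc : c = ')'
  · subst hc; rw [PySem.List.index?_cons_self]; simp [pvRelStep]
  · rw [PySem.List.index?_cons_of_ne rest hc, ← pvRel_fst]; simp [pvRelStep, hc]

-- A's enumerate-fold over the suffix starting at k equals B's collection over that suffix
lemma pvInner_eq (l0 : List Char) :
    ∀ (d : List Char) (k : Nat) (acc : List String), d = l0.drop k →
      (PySem.List.enumerate d (k : Int)).foldl (pvStepA l0) acc
        = acc ++ pvCollect d (pvRel d) := by
  intro d
  induction d with
  | nil => intro k acc _; simp [PySem.List.enumerate_nil, pvCollect]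
  | cons c rest ih =>
    intro k acc hd
    have hrest : rest = l0.drop (k + 1) := by
      rw [← List.tail_drop, ← hd, List.tail_cons]
    have hstep : pvStepA l0 acc ((k : Int), c)
        = acc ++ (if c ∈ pvShapes then
            match PySem.List.index? (c :: rest) ')' with
            | some last => [String.ofList ((c :: rest).take (last + 1))]
            | none => []
          else []) := by
      unfold pvStepA
      dsimp only
      rw [PySem.List.slice_from_natCast, ← hd]
      by_cases hc : c ∈ pvShapes
      · rw [if_pos hc, if_pos hc]
        cases hidx : PySem.List.index? (c :: rest) ')' with
        | none => simp
        | some last =>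
          show acc ++ [String.ofList (PySem.List.slice l0 (some (k : Int))
                  (some ((k : Int) + (last : Int) + 1)))]
              = acc ++ [String.ofList ((c :: rest).take (last + 1))]
          rw [show (k : Int) + (last : Int) + 1 = (k : Int) + ((last + 1 : Nat) : Int) by
                push_cast; ring,
              PySem.List.slice_natCast_add, ← hd]
      · rw [if_neg hc, if_neg hc]; simp
    rw [PySem.List.enumerate_cons, List.foldl_cons, hstep,
        show (k : Int) + 1 = ((k + 1 : Nat) : Int) by push_cast; ring,
        ih (k + 1) _ hrest, pvRel_cons]
    simp only [pvCollect, List.append_assoc]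

-- the two outer folds build the same chunk list
lemma pvChunks_eq (expressions : List String) : ∀ (acc : List String),
    expressions.foldl
      (fun chunks expression =>
        (PySem.List.enumerate expression.toList 0).foldl (pvStepA expression.toList) chunks) acc
      = expressions.foldl
          (fun chunks expression => chunks ++ pvCollect expression.toList (pvRel expression.toList)) acc := by
  have h0 : ∀ (l : List Char) (acc : List String),
      (PySem.List.enumerate l 0).foldl (pvStepA l) acc = acc ++ pvCollect l (pvRel l) := by
    intro l acc
    simpa using pvInner_eq l l 0 acc (by simp)
  induction expressions with
  | nil => intro acc; rfl
  | cons e rest ih =>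
    intro acc
    rw [List.foldl_cons, List.foldl_cons, h0, ih]

lemma pv_ports_eq (expressions : List String) :
    get_draw_set expressions = get_draw_set_alt expressions := by
  unfold get_draw_set get_draw_set_alt
  rw [pvChunks_eq, ← PySem.List.dedup_eq_ofList]

-- ===== VERDICT (by name: the statement is the Claim_ definition above) =====
theorem get_draw_set_spec : Claim_equal_get_draw_set := by
  intro expressions _ _
  unfold Spec_get_draw_set
  exact pv_ports_eq expressions
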